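-- pv_equiv track=rewrite | github.com/jeffrylew/lc-crash-course | backtracking/numbers_with_same_consecutive_differences.py | numsSameConsecDiffDS1
-- ===== SOURCE A (Python) =====
-- def numsSameConsecDiffDS1(n: int, k: int) -> list[int]:
--     if n == 1:
--         return [i for i in range(10)]
--
--     ans = []
--
--     def dfs(remaining_N_digits: int, num: int):
--         # Base case
--         if remaining_N_digits == 0:
--             return ans.append(num)
--
--         tail_digit = num % 10
--
--         # Use set() to avoid duplicates when k == 0
--         next_digits = set([tail_digit + k, tail_digit - k])
--
--         for next_digit in next_digits:
--             if 0 <= next_digit < 10: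
--                 dfs(remaining_N_digits - 1, num * 10 + next_digit)
--
--     for num in range(1, 10):
--         dfs(n - 1, num)
--
--     return list(ans)
-- ===== SOURCE B (Python) =====
-- def numsSameConsecDiffDS1(n: int, k: int) -> list[int]:
--     # Explicit-stack DFS instead of recursion; same visit order as the recursive version.
--     if n == 1:
--         return list(range(10))
--
--     ans = []
--     stack = []
--     for start in range(9, 0, -1):
--         stack.append((n - 1, start))
--
--     while stack:
--         remaining, num = stack.pop()
--         if remaining == 0:
--             ans.append(num)
--             continue
--         tail = num % 10
--         kids = [d for d in set([tail + k, tail - k]) if 0 <= d < 10]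
--         for d in reversed(kids):
--             stack.append((remaining - 1, num * 10 + d))
--
--     return ans
-- ===== Notes on version B (the rewrite author's own statement) =====
-- stated objective: alternative
-- what changed: Replaces the nested recursive dfs with an iterative explicit-stack DFS (pairs of remaining-digits and prefix, children pushed in reverse so LIFO popping reproduces the recursive visit order).
import Mathlib
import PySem

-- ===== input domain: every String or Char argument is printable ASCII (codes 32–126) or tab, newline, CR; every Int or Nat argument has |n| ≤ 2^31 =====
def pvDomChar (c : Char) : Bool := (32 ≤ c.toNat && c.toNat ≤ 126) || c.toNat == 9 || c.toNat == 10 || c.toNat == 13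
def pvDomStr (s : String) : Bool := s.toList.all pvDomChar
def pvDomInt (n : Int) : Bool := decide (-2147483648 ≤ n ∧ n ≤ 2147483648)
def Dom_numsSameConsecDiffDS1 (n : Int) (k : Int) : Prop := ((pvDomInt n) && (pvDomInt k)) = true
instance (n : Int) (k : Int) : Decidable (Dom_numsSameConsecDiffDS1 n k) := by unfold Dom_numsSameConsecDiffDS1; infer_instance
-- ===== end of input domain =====

-- B replaces A's recursive dfs by an iterative explicit-stack DFS with the same visit order (objective: alternative; same cost).


-- ===== PORT A =====
-- Hand-written exact model of CPython's `set([t+k, t-k])` iteration order (PySem has no hash-set):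
-- when the order is observable in the output both elements are digits 0..9; such small non-negative
-- ints hash to themselves and land in an 8-slot table, so iteration is by value mod 8, with a
-- colliding pair kept in insertion order.  Verified against CPython on all digit pairs.
def pvNextDigits (t : Int) (k : Int) : List Int :=
  if t + k = t - k then [t + k]
  else if 0 ≤ t + k ∧ t + k < 10 ∧ 0 ≤ t - k ∧ t - k < 10 ∧
      PySem.Int.mod (t - k) 8 < PySem.Int.mod (t + k) 8 then [t - k, t + k]
  else [t + k, t - k]

-- A's inner `dfs`, with a fuel argument to totalize the recursion; fuel n.toNat suffices because
-- each call decreases remaining_N_digits by 1 towards the remaining = 0 base case (proved below).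
def pvDfsA (k : Int) : Nat → Int → Int → List Int → List Int
  | 0, rem, num, ans => if rem = 0 then ans ++ [num] else ans
  | f + 1, rem, num, ans =>
    if rem = 0 then ans ++ [num]
    else
      (pvNextDigits (PySem.Int.mod num 10) k).foldl
        (fun acc d => if 0 ≤ d ∧ d < 10 then pvDfsA k f (rem - 1) (num * 10 + d) acc else acc) ans

def numsSameConsecDiffDS1 (n : Int) (k : Int) : List Int :=
  if n = 1 then PySem.List.pyRange 0 10 1
  else (PySem.List.pyRange 1 10 1).foldl (fun ans num => pvDfsA k n.toNat (n - 1) num ans) []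

-- ===== PORT B =====
-- B's while-loop over the explicit stack; head of the list = top of the stack, so Python's
-- `for d in reversed(kids): stack.append(...)` becomes prepending kids in original order.
-- The fuel totalizes the loop; it bounds the number of iterations and is proved sufficient on Pre_.
def pvRunB (k : Int) : Nat → List (Int × Int) → List Int → List Int
  | 0, _, ans => ans
  | _ + 1, [], ans => ans
  | f + 1, (rem, num) :: rest, ans =>
    if rem = 0 then pvRunB k f rest (ans ++ [num])
    else
      pvRunB k f
        (((pvNextDigits (PySem.Int.mod num 10) k).filter
            (fun d => decide (0 ≤ d ∧ d < 10))).map (fun d => (rem - 1, num * 10 + d)) ++ rest)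
        ans

def numsSameConsecDiffDS1_alt (n : Int) (k : Int) : List Int :=
  if n = 1 then PySem.List.pyRange 0 10 1
  else
    -- seed: Python pushes starts 9 down to 1, so digit 1 is popped first
    pvRunB k (if k ≤ -10 ∨ 10 ≤ k then 10 else 9 * 2 ^ n.toNat + 1)
      ((PySem.List.pyRange 9 0 (-1)).foldl (fun st num => (n - 1, num) :: st) []) []

-- ===== PRECONDITION & SPEC =====
-- Pre_ excludes n ≤ 0 together with |k| ≤ 9: there A's dfs recurses forever below 0 and raises RecursionError.
def Pre_numsSameConsecDiffDS1 (n : Int) (k : Int) : Prop := 1 ≤ n ∨ k ≤ -10 ∨ 10 ≤ k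
instance (n : Int) (k : Int) : Decidable (Pre_numsSameConsecDiffDS1 n k) := by
  unfold Pre_numsSameConsecDiffDS1; infer_instance

def pvWitness_numsSameConsecDiffDS1 : Int × Int := (3, 2)

def Spec_numsSameConsecDiffDS1 (n : Int) (k : Int) (out : List Int) : Prop := out = numsSameConsecDiffDS1_alt n k
instance (n : Int) (k : Int) (out : List Int) : Decidable (Spec_numsSameConsecDiffDS1 n k out) := by unfold Spec_numsSameConsecDiffDS1; infer_instance

-- ===== CLAIM (what is proved, stated in full; the proofs are below) =====
def Claim_equal_numsSameConsecDiffDS1 : Prop := ∀ (n : Int) (k : Int), Dom_numsSameConsecDiffDS1 n k → Pre_numsSameConsecDiffDS1 n k → Spec_numsSameConsecDiffDS1 n k (numsSameConsecDiffDS1 n k)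

-- ===== LEMMAS AND PROOFS =====

-- folding with an `if` guard = folding the filtered list
theorem pvFoldlIfFilter (g : Int → List Int → List Int) :
    ∀ (l : List Int) (a0 : List Int),
      l.foldl (fun a d => if 0 ≤ d ∧ d < 10 then g d a else a) a0
        = (l.filter (fun d => decide (0 ≤ d ∧ d < 10))).foldl (fun a d => g d a) a0 := by
  intro l
  induction l with
  | nil => intro a0; rfl
  | cons x xs ih =>
    intro a0
    by_cases hx : 0 ≤ x ∧ x < 10 <;> simp [List.filter, hx, ih]

-- with |k| ≥ 10 no candidate digit survives the range filter
theorem pvKidsEmpty (k x : Int) (hk : k ≤ -10 ∨ 10 ≤ k) :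
    (pvNextDigits (PySem.Int.mod x 10) k).filter (fun d => decide (0 ≤ d ∧ d < 10)) = [] := by
  have h0 : 0 ≤ PySem.Int.mod x 10 := PySem.Int.mod_nonneg x (by norm_num)
  have h1 : PySem.Int.mod x 10 < 10 := PySem.Int.mod_lt x (by norm_num)
  unfold pvNextDigits
  set t := PySem.Int.mod x 10 with ht
  simp only [List.filter_eq_nil_iff]
  split_ifs <;> intro d hd <;> simp_all <;> omega

-- fuel irrelevance: any fuel ≥ rem.toNat computes the canonical value (rem ≥ 0)
theorem pvDfsA_fuel (k : Int) :
    ∀ (m : Nat) (rem : Int), 0 ≤ rem → rem.toNat ≤ m →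
      ∀ (f : Nat), rem.toNat ≤ f →
        ∀ (num : Int) (ans : List Int), pvDfsA k f rem num ans = pvDfsA k rem.toNat rem num ans := by
  intro m
  induction m with
  | zero =>
    intro rem h0 hm f hf num ans
    have : rem = 0 := by omega
    subst this
    cases f <;> simp [pvDfsA]
  | succ m ih =>
    intro rem h0 hm f hf num ans
    by_cases hz : rem = 0
    · subst hz; cases f <;> simp [pvDfsA]
    · have h1 : 1 ≤ rem := by omega
      obtain ⟨s, hs⟩ : ∃ s, rem.toNat = s + 1 := ⟨rem.toNat - 1, by omega⟩
      obtain ⟨f', hf'⟩ : ∃ f', f = f' + 1 := ⟨f - 1, by omega⟩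
      subst hf'
      rw [hs]
      have hs' : (rem - 1).toNat = s := by omega
      simp only [pvDfsA, if_neg hz]
      have hfun :
          (fun acc d => if 0 ≤ d ∧ d < 10 then pvDfsA k f' (rem - 1) (num * 10 + d) acc else acc)
            = (fun acc d => if 0 ≤ d ∧ d < 10 then pvDfsA k s (rem - 1) (num * 10 + d) acc else acc) := by
        funext acc d
        split_ifs with hd
        · rw [ih (rem - 1) (by omega) (by omega) f' (by omega),
              ih (rem - 1) (by omega) (by omega) s (by omega)]
        · rfl
      rw [hfun]

-- iteration budget for a stack: a node at depth rem needs at most 2^(rem+1) - 1 pops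
def pvCost : List (Int × Int) → Nat
  | [] => 0
  | (r, _) :: s => (2 ^ (r.toNat + 1) - 1) + pvCost s

theorem pvCost_append : ∀ (s t : List (Int × Int)), pvCost (s ++ t) = pvCost s + pvCost t := by
  intro s t
  induction s with
  | nil => simp [pvCost]
  | cons p s ih => cases p; simp [pvCost, ih]; omega

theorem pvCost_map (r num : Int) :
    ∀ (l : List Int), pvCost (l.map (fun d => (r, num * 10 + d))) = l.length * (2 ^ (r.toNat + 1) - 1) := by
  intro l
  induction l with
  | nil => simp [pvCost]
  | cons x xs ih => simp [pvCost, ih]; ring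

theorem pvNextDigits_len (t k : Int) : (pvNextDigits t k).length ≤ 2 := by
  unfold pvNextDigits; split_ifs <;> simp

-- |k| ≥ 10: the stack only shrinks, nothing is ever appended as long as no rem hits 0
theorem pvRunB_bigk (k : Int) (hk : k ≤ -10 ∨ 10 ≤ k) :
    ∀ (F : Nat) (stack : List (Int × Int)) (ans : List Int),
      (∀ p ∈ stack, p.1 ≠ 0) → stack.length < F → pvRunB k F stack ans = ans := by
  intro F
  induction F with
  | zero => intro stack ans _ h; omega
  | succ F ih =>
    intro stack ans hne hlen
    match stack with
    | [] => rfl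
    | (r, x) :: rest =>
      have hr : r ≠ 0 := hne (r, x) (by simp)
      simp only [pvRunB, if_neg hr, pvKidsEmpty k x hk, List.map_nil, List.nil_append]
      exact ih rest ans (fun p hp => hne p (List.mem_cons_of_mem _ hp)) (by simp at hlen ⊢; omega)

-- MAIN: with enough fuel and non-negative depths, the stack loop folds A's dfs over the stack
theorem pvRunB_eq (k : Int) :
    ∀ (F : Nat) (stack : List (Int × Int)) (ans : List Int),
      (∀ p ∈ stack, 0 ≤ p.1) → pvCost stack ≤ F →
      pvRunB k F stack ans = stack.foldl (fun a p => pvDfsA k p.1.toNat p.1 p.2 a) ans := by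
  intro F
  induction F with
  | zero =>
    intro stack ans _ hc
    match stack with
    | [] => rfl
    | (r, x) :: rest =>
      exfalso
      have h1 : 1 ≤ 2 ^ (r.toNat + 1) := Nat.one_le_two_pow
      simp [pvCost] at hc; omega
  | succ F ih =>
    intro stack ans hnn hc
    match stack with
    | [] => rfl
    | (r, x) :: rest =>
      have hr0 : 0 ≤ r := hnn (r, x) (by simp)
      have hrest : ∀ p ∈ rest, 0 ≤ p.1 := fun p hp => hnn p (List.mem_cons_of_mem _ hp)
      simp only [pvCost] at hc
      by_cases hz : r = 0
      · subst hz
        simp only [pvRunB]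
        have hc' : pvCost rest ≤ F := by norm_num at hc; omega
        rw [ih rest (ans ++ [x]) hrest hc']
        simp [List.foldl_cons, pvDfsA]
      · have h1 : 1 ≤ r := by omega
        have hs : (r - 1).toNat + 1 = r.toNat := by omega
        set kids := (pvNextDigits (PySem.Int.mod x 10) k).filter (fun d => decide (0 ≤ d ∧ d < 10)) with hkids
        have hklen : kids.length ≤ 2 :=
          le_trans (List.length_filter_le _ _) (pvNextDigits_len _ _)
        have hcost :
            pvCost (kids.map (fun d => (r - 1, x * 10 + d)) ++ rest) ≤ F := by
          rw [pvCost_append, pvCost_map]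
          have hp : 1 ≤ 2 ^ (r - 1).toNat := Nat.one_le_two_pow
          have h2 : 2 ^ (r.toNat + 1) = 2 * 2 ^ ((r - 1).toNat + 1) := by
            rw [hs]; ring
          have hb : kids.length * (2 ^ ((r - 1).toNat + 1) - 1) ≤ 2 * (2 ^ ((r - 1).toNat + 1) - 1) :=
            Nat.mul_le_mul_right _ hklen
          omega
        have hnn' : ∀ p ∈ kids.map (fun d => (r - 1, x * 10 + d)) ++ rest, 0 ≤ p.1 := by
          intro p hp
          rcases List.mem_append.mp hp with hp | hp
          · obtain ⟨d, _, rfl⟩ := List.mem_map.mp hp; simpa using by omega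
          · exact hrest p hp
        simp only [pvRunB, if_neg hz, ← hkids]
        rw [ih _ ans hnn' hcost, List.foldl_append, List.foldl_map]
        simp only [List.foldl_cons]
        congr 1
        -- one expansion of dfs = fold over the filtered children
        have : r.toNat = (r - 1).toNat + 1 := hs.symm
        rw [this]
        simp only [pvDfsA, if_neg hz]
        rw [pvFoldlIfFilter (fun d a => pvDfsA k (r - 1).toNat (r - 1) (x * 10 + d) a)]

theorem pvRangeDown : PySem.List.pyRange 9 0 (-1) = [9, 8, 7, 6, 5, 4, 3, 2, 1] := by decide
theorem pvRangeUp : PySem.List.pyRange 1 10 1 = [1, 2, 3, 4, 5, 6, 7, 8, 9] := by decide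

-- ===== VERDICT (by name: the statement is the Claim_ definition above) =====
theorem numsSameConsecDiffDS1_spec : Claim_equal_numsSameConsecDiffDS1 := by
  intro n k _ hpre
  unfold Spec_numsSameConsecDiffDS1 numsSameConsecDiffDS1 numsSameConsecDiffDS1_alt
  by_cases h1 : n = 1
  · simp [h1]
  · simp only [if_neg h1]
    by_cases hk : k ≤ -10 ∨ 10 ≤ k
    · -- |k| ≥ 10: both sides return []
      rw [pvRangeDown, pvRangeUp]
      have hB : pvRunB k (if k ≤ -10 ∨ 10 ≤ k then 10 else 9 * 2 ^ n.toNat + 1)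
          ([(9:Int), 8, 7, 6, 5, 4, 3, 2, 1].foldl (fun st num => (n - 1, num) :: st) []) [] = [] := by
        rw [if_pos hk]
        apply pvRunB_bigk k hk
        · intro p hp; simp [List.foldl] at hp
          rcases hp with rfl | rfl | rfl | rfl | rfl | rfl | rfl | rfl | rfl <;> simp <;> omega
        · simp [List.foldl]
      rw [hB]
      have hA : ∀ (num : Int) (ans : List Int), pvDfsA k n.toNat (n - 1) num ans = ans := by
        intro num ans
        have hz : n - 1 ≠ 0 := by omega
        cases hfn : n.toNat with
        | zero => simp [pvDfsA, hz]
        | succ f =>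
          simp only [pvDfsA, if_neg hz]
          rw [pvFoldlIfFilter (fun d a => pvDfsA k f (n - 1 - 1) (num * 10 + d) a),
              pvKidsEmpty k num hk]
          rfl
      simp [List.foldl, hA]
    · -- |k| ≤ 9: Pre_ forces n ≥ 1, hence n ≥ 2 here
      have hn2 : 2 ≤ n := by
        rcases hpre with h | h | h
        · omega
        · exact absurd (Or.inl h) hk
        · exact absurd (Or.inr h) hk
      rw [pvRangeDown, pvRangeUp, if_neg hk]
      have hrw : pvRunB k (9 * 2 ^ n.toNat + 1)
          ([(9:Int), 8, 7, 6, 5, 4, 3, 2, 1].foldl (fun st num => (n - 1, num) :: st) []) []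
          = ([((n-1:Int), (1:Int)), (n-1, 2), (n-1, 3), (n-1, 4), (n-1, 5), (n-1, 6), (n-1, 7), (n-1, 8), (n-1, 9)]).foldl
              (fun a p => pvDfsA k p.1.toNat p.1 p.2 a) [] := by
        have hstack : ([(9:Int), 8, 7, 6, 5, 4, 3, 2, 1].foldl (fun st num => (n - 1, num) :: st) ([] : List (Int × Int)))
            = [((n-1:Int), (1:Int)), (n-1, 2), (n-1, 3), (n-1, 4), (n-1, 5), (n-1, 6), (n-1, 7), (n-1, 8), (n-1, 9)] := by
          simp [List.foldl]
        rw [hstack]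
        apply pvRunB_eq
        · intro p hp; simp at hp
          rcases hp with rfl | rfl | rfl | rfl | rfl | rfl | rfl | rfl | rfl <;> simp <;> omega
        · have hs : (n - 1).toNat + 1 = n.toNat := by omega
          have hp : 1 ≤ 2 ^ (n - 1).toNat := Nat.one_le_two_pow
          simp only [pvCost]
          have h2 : 2 ^ n.toNat = 2 * 2 ^ (n - 1).toNat := by rw [← hs]; ring
          omega
      rw [hrw]
      have hmono : ∀ (num : Int) (a : List Int),
          pvDfsA k n.toNat (n - 1) num a = pvDfsA k (n - 1).toNat (n - 1) num a := by
        intro num a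
        exact pvDfsA_fuel k n.toNat (n - 1) (by omega) (by omega) n.toNat (by omega) num a
      simp [List.foldl, hmono]
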